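-- pv_equiv track=rewrite | github.com/star-jay/connect-go | connect/bots/trapbot.py | score_for_combination
-- ===== SOURCE A (Python) =====
-- def revert_sign(sign):
--     if sign == 0:
--         return 1
--     else:
--         return 0
--
-- def score_for_combination(board, combination, sign):
--     # how many of the same sign are in the board
--     if any([
--             board[node] % 2 == revert_sign(sign)
--             for node in combination if board[node] is not None]):
--         return 0
--     translate = [
--         board[node] % 2 for node in combination
--         if board[node] is not None
--     ]
--
--     return translate.count(sign)
-- ===== SOURCE B (Python) =====
-- def revert_sign(sign):
--     if sign == 0:
--         return 1
--     else:
--         return 0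
--
-- def score_for_combination(board, combination, sign):
--     # Single fused pass with an explicit counter and early exit, replacing
--     # A's three scans (any-check list, translate list build, .count).
--     bad = revert_sign(sign)
--     count = 0
--     for node in combination:
--         v = board[node]
--         if v is None:
--             continue
--         parity = v % 2
--         if parity == bad:
--             return 0
--         if parity == sign:
--             count += 1
--     return count
-- ===== Notes on version B (the rewrite author's own statement) =====
-- stated objective: faster
-- what changed: Replaced A's three separate scans (any-check over a materialized comprehension list, a second comprehension building translate, and translate.count) by one fused loop over combination with an explicit counter and an early return on the opposite parity; no intermediate lists are built.
import Mathlib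
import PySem

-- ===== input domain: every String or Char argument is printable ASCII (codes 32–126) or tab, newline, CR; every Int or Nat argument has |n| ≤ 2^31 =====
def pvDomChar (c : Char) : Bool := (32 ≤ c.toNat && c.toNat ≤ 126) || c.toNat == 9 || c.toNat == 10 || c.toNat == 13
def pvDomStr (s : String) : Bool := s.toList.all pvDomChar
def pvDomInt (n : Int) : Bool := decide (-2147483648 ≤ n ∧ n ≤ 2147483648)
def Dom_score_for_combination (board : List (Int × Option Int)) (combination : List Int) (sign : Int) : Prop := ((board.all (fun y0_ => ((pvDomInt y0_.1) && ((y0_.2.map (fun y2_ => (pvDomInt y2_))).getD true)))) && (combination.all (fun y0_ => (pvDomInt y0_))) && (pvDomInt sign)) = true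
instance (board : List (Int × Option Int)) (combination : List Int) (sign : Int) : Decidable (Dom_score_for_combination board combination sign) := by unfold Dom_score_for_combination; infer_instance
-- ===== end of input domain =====

-- B fuses A's three scans (any-check list, translate list, .count) into one loop
-- with an explicit counter and an early return; equivalence is proved on all
-- inputs where A does not raise KeyError.

-- ===== PORT A =====
def revertSign (sign : Int) : Int := if sign = 0 then 1 else 0

-- dict lookup board[node]: first match; the Option Int value is the stored value (None possible)
def boardGet (board : List (Int × Option Int)) (node : Int) : Option Int :=
  (List.lookup node board).bind id

def score_for_combination (board : List (Int × Option Int)) (combination : List Int) (sign : Int) : Int :=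
  let anyList : List Bool :=
    (combination.filterMap (fun node => boardGet board node)).map
      (fun v => PySem.Int.mod v 2 == revertSign sign)
  if anyList.any id then 0
  else
    let translate : List Int :=
      (combination.filterMap (fun node => boardGet board node)).map
        (fun v => PySem.Int.mod v 2)
    (translate.count sign : Int)

-- ===== PORT B =====
def altLoop (board : List (Int × Option Int)) (sign bad : Int) : List Int → Int → Int
  | [], count => count
  | node :: rest, count =>
    match boardGet board node with
    | none => altLoop board sign bad rest count
    | some v =>
      let parity := PySem.Int.mod v 2
      if parity = bad then 0
      else if parity = sign then altLoop board sign bad rest (count + 1)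
      else altLoop board sign bad rest count

def score_for_combination_alt (board : List (Int × Option Int)) (combination : List Int) (sign : Int) : Int :=
  altLoop board sign (revertSign sign) combination 0

-- ===== PRECONDITION & SPEC =====
-- Pre_ excludes exactly the inputs on which Python A raises KeyError: some node of
-- combination is not a key of the board dict (B raises there too).
def Pre_score_for_combination (board : List (Int × Option Int)) (combination : List Int) (sign : Int) : Prop :=
  (combination.all (fun node => (List.lookup node board).isSome)) = true
instance (board : List (Int × Option Int)) (combination : List Int) (sign : Int) : Decidable (Pre_score_for_combination board combination sign) := by unfold Pre_score_for_combination; infer_instance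

def pvWitness_score_for_combination : (List (Int × Option Int)) × List Int × Int :=
  ([(1, some 3), (2, none), (3, some 4)], [1, 2], 0)

def Spec_score_for_combination (board : List (Int × Option Int)) (combination : List Int) (sign : Int) (out : Int) : Prop := out = score_for_combination_alt board combination sign
instance (board : List (Int × Option Int)) (combination : List Int) (sign : Int) (out : Int) : Decidable (Spec_score_for_combination board combination sign out) := by unfold Spec_score_for_combination; infer_instance

-- ===== CLAIM (what is proved, stated in full; the proofs are below) =====
def Claim_equal_score_for_combination : Prop := ∀ (board : List (Int × Option Int)) (combination : List Int) (sign : Int), Dom_score_for_combination board combination sign → Pre_score_for_combination board combination sign → Spec_score_for_combination board combination sign (score_for_combination board combination sign)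

-- ===== LEMMAS AND PROOFS =====

-- the values A extracts from the board for a node list
def pvVals (board : List (Int × Option Int)) (l : List Int) : List Int :=
  l.filterMap (fun node => boardGet board node)

lemma altLoop_eq (board : List (Int × Option Int)) (sign bad : Int) :
    ∀ (l : List Int) (count : Int),
      altLoop board sign bad l count =
        if ((pvVals board l).map (fun v => PySem.Int.mod v 2 == bad)).any id then 0
        else count + (((pvVals board l).map (fun v => PySem.Int.mod v 2)).count sign : Int) := by
  intro l
  induction l with
  | nil => intro count; simp [altLoop, pvVals]
  | cons node rest ih =>
    intro count
    cases h : boardGet board node with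
    | none =>
      have hv : pvVals board (node :: rest) = pvVals board rest := by simp [pvVals, h]
      simp only [altLoop, h, hv, ih]
    | some v =>
      have hv : pvVals board (node :: rest) = v :: pvVals board rest := by simp [pvVals, h]
      simp only [altLoop, h, hv, List.map_cons, List.any_cons, List.count_cons, id_eq, ih]
      generalize PySem.Int.mod v 2 = p
      generalize (List.map (fun v => PySem.Int.mod v 2 == bad) (pvVals board rest)).any id = c
      cases c <;> simp [beq_iff_eq] <;> split_ifs <;> push_cast <;> omega

-- ===== VERDICT (by name: the statement is the Claim_ definition above) =====
theorem score_for_combination_spec : Claim_equal_score_for_combination := by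
  intro board combination sign _ _
  unfold Spec_score_for_combination score_for_combination score_for_combination_alt
  rw [altLoop_eq]
  simp only [pvVals, zero_add]
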